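-- pv_equiv track=rewrite | github.com/GC-Graduation-Project/Recognize | functions.py | remove_notes
-- ===== SOURCE A (Python) =====
-- def remove_notes(lst):
--     # 비슷한 요소들 중 마지막 요소를 제외하고 리스트를 반환
--     to_keep = []
--     n = len(lst)
--     for i in range(n):
--         keep = True
--         for j in range(i + 1, n):
--             if abs(lst[i][-1] - lst[j][-1]) <= 3:
--                 keep = False
--                 break
--         if keep:
--             to_keep.append(lst[i])
--     return to_keep
-- ===== SOURCE B (Python) =====
-- from bisect import bisect_left, insort
--
-- def remove_notes(lst):
--     # right-to-left sweep: keep an element iff no later last-value lies within 3;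
--     # 'seen' is a sorted list of last-values already passed, queried with bisect
--     kept = []
--     seen = []
--     for el in reversed(lst):
--         v = el[-1]
--         i = bisect_left(seen, v - 3)
--         if i == len(seen) or seen[i] > v + 3:
--             kept.append(el)
--         insort(seen, v)
--     return kept[::-1]
-- ===== Notes on version B (the rewrite author's own statement) =====
-- stated objective: alternative
-- what changed: Replaced the quadratic scan of all later elements by a single right-to-left sweep keeping a sorted list of last-values queried with bisect; intended as faster, but measured only ~1.4x at the largest size.
-- outside the precondition, e.g. on remove_notes([[]]): A returns [[]], B raises IndexError
import Mathlib
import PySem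

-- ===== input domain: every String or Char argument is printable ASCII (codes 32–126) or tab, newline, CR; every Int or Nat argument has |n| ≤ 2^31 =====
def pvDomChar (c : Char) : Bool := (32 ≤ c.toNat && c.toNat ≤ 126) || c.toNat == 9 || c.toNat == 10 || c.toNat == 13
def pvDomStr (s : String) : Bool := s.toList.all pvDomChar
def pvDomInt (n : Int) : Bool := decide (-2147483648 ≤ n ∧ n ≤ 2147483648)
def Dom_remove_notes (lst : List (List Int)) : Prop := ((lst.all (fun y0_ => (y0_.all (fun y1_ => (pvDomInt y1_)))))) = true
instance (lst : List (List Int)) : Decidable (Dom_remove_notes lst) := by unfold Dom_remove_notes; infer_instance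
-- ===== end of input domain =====

-- B replaces A's quadratic later-element scan with a right-to-left sweep over a sorted
-- list of last-values queried by bisection (alternative algorithm; not measured ≥1.5x faster).


-- ===== PORT A =====
-- el[-1] (exact for nonempty el, which Pre_ guarantees wherever it is read)
def lastV (el : List Int) : Int := (PySem.List.pyGet? el (-1)).getD 0

-- A's inner 'for j … if abs(...) <= 3: keep=False; break' over the suffix after i
def anyCloseA (v : Int) : List (List Int) → Bool
  | [] => false
  | e :: t => if (v - lastV e).natAbs ≤ 3 then true else anyCloseA v t

-- A's outer loop over i, appending lst[i] when keep stayed True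
def remove_notes : List (List Int) → List (List Int)
  | [] => []
  | e :: t => if anyCloseA (lastV e) t then remove_notes t else e :: remove_notes t

-- ===== PORT B =====
-- bisect_left on the sorted 'seen' followed by the range check seen[i] ≤ v+3
def bisectCheck (v : Int) : List Int → Bool
  | [] => false
  | x :: t => if x < v - 3 then bisectCheck v t else decide (x ≤ v + 3)

-- bisect.insort into the sorted 'seen'
def insortL (v : Int) : List Int → List Int
  | [] => [v]
  | x :: t => if x ≤ v then x :: insortL v t else v :: x :: t

-- single pass over reversed(lst) carrying (kept, seen), then kept[::-1]
def remove_notes_alt (lst : List (List Int)) : List (List Int) :=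
  (lst.reverse.foldl
    (fun (st : List (List Int) × List Int) el =>
      let v := lastV el
      ((if bisectCheck v st.2 then st.1 else st.1 ++ [el]), insortL v st.2))
    ([], [])).1.reverse

-- ===== PRECONDITION & SPEC =====
-- Pre_ excludes lists containing an empty sublist: el[-1] raises IndexError in both
-- programs on almost all of them; on the few where A happens not to read the empty
-- sublist (e.g. [[]]) B still raises, so they are excluded too.
def Pre_remove_notes (lst : List (List Int)) : Prop := ∀ el ∈ lst, el ≠ []
instance (lst : List (List Int)) : Decidable (Pre_remove_notes lst) := by unfold Pre_remove_notes; infer_instance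
def pvWitness_remove_notes : List (List Int) := [[1], [10], [12]]

def Spec_remove_notes (lst : List (List Int)) (out : List (List Int)) : Prop := out = remove_notes_alt lst
instance (lst : List (List Int)) (out : List (List Int)) : Decidable (Spec_remove_notes lst out) := by unfold Spec_remove_notes; infer_instance

-- ===== CLAIM (what is proved, stated in full; the proofs are below) =====
def Claim_equal_remove_notes : Prop := ∀ (lst : List (List Int)), Dom_remove_notes lst → Pre_remove_notes lst → Spec_remove_notes lst (remove_notes lst)

-- ===== LEMMAS AND PROOFS =====

-- close-membership predicate shared by the two characterisations
def closeB (v x : Int) : Bool := (v - x).natAbs ≤ 3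

-- the 'seen' component after folding a block of elements
def seenAfter (r : List (List Int)) (s : List Int) : List Int :=
  r.foldl (fun s e => insortL (lastV e) s) s

-- the kept-suffix produced by B's fold, as a standalone recursion
def hB : List (List Int) → List Int → List (List Int)
  | [], _ => []
  | e :: t, s => (if bisectCheck (lastV e) s then [] else [e]) ++ hB t (insortL (lastV e) s)

-- A generalized with an extra pool of already-seen values
def Aext : List (List Int) → List Int → List (List Int)
  | [], _ => []
  | e :: t, s =>
      if anyCloseA (lastV e) t || s.any (closeB (lastV e)) then Aext t s
      else e :: Aext t s

theorem mem_insortL (v y : Int) (s : List Int) : y ∈ insortL v s ↔ y = v ∨ y ∈ s := by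
  induction s with
  | nil => simp [insortL]
  | cons x t ih =>
      simp only [insortL]
      split <;> simp [ih] <;> tauto

theorem sorted_insortL (v : Int) (s : List Int) (h : s.Pairwise (· ≤ ·)) :
    (insortL v s).Pairwise (· ≤ ·) := by
  induction s with
  | nil => simp [insortL]
  | cons x t ih =>
      simp only [insortL]
      rcases List.pairwise_cons.1 h with ⟨hx, ht⟩
      split
      · refine List.pairwise_cons.2 ⟨?_, ih ht⟩
        intro y hy
        rcases (mem_insortL v y t).1 hy with rfl | hy
        · omega
        · exact hx y hy
      · refine List.pairwise_cons.2 ⟨?_, h⟩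
        intro y hy
        rcases List.mem_cons.1 hy with rfl | hy
        · omega
        · have := hx y hy; omega

theorem bisectCheck_eq_any (v : Int) (s : List Int) (h : s.Pairwise (· ≤ ·)) :
    bisectCheck v s = s.any (closeB v) := by
  induction s with
  | nil => simp [bisectCheck]
  | cons x t ih =>
      rcases List.pairwise_cons.1 h with ⟨hx, ht⟩
      simp only [bisectCheck, List.any_cons]
      split
      · have hxc : closeB v x = false := by simp [closeB]; omega
        simp [hxc, ih ht]
      · rename_i hge
        by_cases hle : x ≤ v + 3
        · have : closeB v x = true := by simp [closeB]; omega
          simp [hle, this]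
        · have hxc : closeB v x = false := by simp [closeB]; omega
          have : t.any (closeB v) = false := by
            rw [List.any_eq_false]
            intro y hy
            have := hx y hy
            simp [closeB]; omega
          simp [hxc, this, hle]

theorem sorted_seenAfter (r : List (List Int)) (s : List Int) (h : s.Pairwise (· ≤ ·)) :
    (seenAfter r s).Pairwise (· ≤ ·) := by
  induction r generalizing s with
  | nil => simpa [seenAfter]
  | cons e t ih => simpa [seenAfter, List.foldl_cons] using ih _ (sorted_insortL _ _ h)

theorem mem_seenAfter (r : List (List Int)) (s : List Int) (y : Int) :
    y ∈ seenAfter r s ↔ (∃ e ∈ r, lastV e = y) ∨ y ∈ s := by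
  induction r generalizing s with
  | nil => simp [seenAfter]
  | cons e t ih =>
      simp only [seenAfter, List.foldl_cons] at *
      rw [ih]
      simp only [mem_insortL, List.mem_cons]
      constructor
      · rintro (⟨e', he', rfl⟩ | rfl | h)
        · exact Or.inl ⟨e', Or.inr he', rfl⟩
        · exact Or.inl ⟨e, Or.inl rfl, rfl⟩
        · exact Or.inr h
      · rintro (⟨e', rfl | he', rfl⟩ | h)
        · exact Or.inr (Or.inl rfl)
        · exact Or.inl ⟨e', he', rfl⟩
        · exact Or.inr (Or.inr h)

theorem foldl_fst (r : List (List Int)) (k : List (List Int)) (s : List Int) :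
    (r.foldl
      (fun (st : List (List Int) × List Int) el =>
        let v := lastV el
        ((if bisectCheck v st.2 then st.1 else st.1 ++ [el]), insortL v st.2))
      (k, s)).1 = k ++ hB r s := by
  induction r generalizing k s with
  | nil => simp [hB]
  | cons e t ih =>
      simp only [List.foldl_cons, hB]
      rw [ih]
      split <;> simp

theorem hB_append (r1 r2 : List (List Int)) (s : List Int) :
    hB (r1 ++ r2) s = hB r1 s ++ hB r2 (seenAfter r1 s) := by
  induction r1 generalizing s with
  | nil => simp [hB, seenAfter]
  | cons e t ih => simp [hB, ih, seenAfter, List.foldl_cons]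

theorem anyCloseA_eq_any (v : Int) (t : List (List Int)) :
    anyCloseA v t = t.any (fun e => closeB v (lastV e)) := by
  induction t with
  | nil => simp [anyCloseA]
  | cons e r ih =>
      simp only [anyCloseA, List.any_cons, closeB]
      split <;> simp_all [closeB]

theorem hB_reverse_eq_Aext (lst : List (List Int)) (s : List Int) (h : s.Pairwise (· ≤ ·)) :
    (hB lst.reverse s).reverse = Aext lst s := by
  induction lst generalizing s with
  | nil => simp [hB, Aext]
  | cons e t ih =>
      have hs' : (seenAfter t.reverse s).Pairwise (· ≤ ·) := sorted_seenAfter _ _ h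
      have hcheck : bisectCheck (lastV e) (seenAfter t.reverse s)
          = (anyCloseA (lastV e) t || s.any (closeB (lastV e))) := by
        rw [bisectCheck_eq_any _ _ hs', anyCloseA_eq_any]
        rcases hb : (t.any (fun e' => closeB (lastV e) (lastV e')) || s.any (closeB (lastV e))) with _ | _
        · rw [List.any_eq_false]
          intro y hy
          rcases (mem_seenAfter _ _ _).1 hy with ⟨e', he', rfl⟩ | hy
          · simp only [Bool.or_eq_false_iff, List.any_eq_false] at hb
            exact hb.1 e' (by simpa using he')
          · simp only [Bool.or_eq_false_iff, List.any_eq_false] at hb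
            exact hb.2 y hy
        · rw [List.any_eq_true]
          simp only [Bool.or_eq_true, List.any_eq_true] at hb
          rcases hb with ⟨e', he', hc⟩ | ⟨y, hy, hc⟩
          · exact ⟨lastV e', (mem_seenAfter _ _ _).2 (Or.inl ⟨e', by simpa using he', rfl⟩), hc⟩
          · exact ⟨y, (mem_seenAfter _ _ _).2 (Or.inr hy), hc⟩
      rw [List.reverse_cons, hB_append]
      simp only [hB, List.append_nil, List.reverse_append, Aext, hcheck]
      rw [ih _ h]
      split <;> simp

theorem Aext_nil_eq_A (lst : List (List Int)) : Aext lst [] = remove_notes lst := by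
  induction lst with
  | nil => rfl
  | cons e t ih => simp [Aext, remove_notes, ih]

-- ===== VERDICT (by name: the statement is the Claim_ definition above) =====
theorem remove_notes_spec : Claim_equal_remove_notes := by
  intro lst _ _
  show remove_notes lst = remove_notes_alt lst
  unfold remove_notes_alt
  rw [foldl_fst, List.nil_append, hB_reverse_eq_Aext lst [] (by simp), Aext_nil_eq_A]
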